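-- pv_equiv track=rewrite | github.com/pypi-data/pypi-mirror-359 | packages/google-sheet-mcp/google_sheet_mcp-0.2.1.tar.gz/google_sheet_mcp-0.2.1/google_sheet_mcp/tools.py | _convert_to_markdown_table
-- ===== SOURCE A (Python) =====
-- from typing import List
--
-- def _convert_to_markdown_table(values: List[List[str]]) -> str:
--     """
--     Convert a 2D list of values to a markdown table format.
--
--     Args:
--         values (List[List[str]]): 2D list of cell values
--
--     Returns:
--         str: Markdown formatted table
--     """
--     if not values:
--         return "No data available"
--
--     # Find the maximum width for each column
--     max_widths = []
--     for col in range(len(values[0])):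
--         max_width = max(len(str(row[col] if col < len(row) else "")) for row in values)
--         max_widths.append(max_width)
--
--     # Build the markdown table
--     markdown_lines = []
--
--     # Header row
--     header_cells = []
--     for i, cell in enumerate(values[0]):
--         header_cells.append(f"| {str(cell):<{max_widths[i]}} ")
--     markdown_lines.append("".join(header_cells) + "|")
--
--     # Separator row
--     separator_cells = []
--     for width in max_widths:
--         separator_cells.append(f"| {'-' * width} ")
--     markdown_lines.append("".join(separator_cells) + "|")
--
--     # Data rows
--     for row in values[1:]:
--         data_cells = []
--         for i in range(len(max_widths)):
--             cell = str(row[i]) if i < len(row) else ""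
--             data_cells.append(f"| {cell:<{max_widths[i]}} ")
--         markdown_lines.append("".join(data_cells) + "|")
--
--     return "\n".join(markdown_lines)
-- ===== SOURCE B (Python) =====
-- from typing import List
--
-- def _convert_to_markdown_table(values: List[List[str]]) -> str:
--     if not values:
--         return "No data available"
--     n = len(values[0])
--     # Build the table COLUMN BY COLUMN: each finished column already holds its
--     # padded header cell, its separator cell and its padded data cells.
--     columns = []
--     for i in range(n):
--         cells = [str(r[i]) if i < len(r) else "" for r in values]
--         w = max(map(len, cells))
--         padded = [c.ljust(w) for c in cells]
--         columns.append([padded[0], "-" * w] + padded[1:])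
--     # Assemble output rows by indexing across the finished columns (a transpose).
--     nrows = len(values) + 1
--     lines = ["".join(f"| {col[r]} " for col in columns) + "|" for r in range(nrows)]
--     return "\n".join(lines)
-- ===== Notes on version B (the rewrite author's own statement) =====
-- stated objective: alternative
-- what changed: B builds the table column by column - each column is fully clamped, measured, padded and given its own separator cell - and then assembles the output lines by transposing (indexing row r across the finished columns), instead of A's three separately-coded row-oriented header/separator/data formatting blocks.
import Mathlib
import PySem

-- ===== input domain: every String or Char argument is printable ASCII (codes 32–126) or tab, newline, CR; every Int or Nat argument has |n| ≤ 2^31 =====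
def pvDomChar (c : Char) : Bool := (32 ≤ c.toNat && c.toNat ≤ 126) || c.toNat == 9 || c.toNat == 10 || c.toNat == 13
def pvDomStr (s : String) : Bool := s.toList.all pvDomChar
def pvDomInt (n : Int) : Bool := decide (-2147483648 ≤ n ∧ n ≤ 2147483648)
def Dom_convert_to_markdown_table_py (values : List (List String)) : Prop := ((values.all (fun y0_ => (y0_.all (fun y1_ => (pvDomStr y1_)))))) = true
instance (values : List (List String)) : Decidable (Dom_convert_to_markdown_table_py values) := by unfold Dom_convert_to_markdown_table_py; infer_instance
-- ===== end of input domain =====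

-- B builds the table column by column (clamp, measure, pad and add the separator cell per
-- column) and assembles the output lines by transposing the finished columns, instead of A's
-- three row-oriented header/separator/data blocks (objective: alternative; no speed claim).

-- ===== PORT A =====
-- `row[i] if i < len(row) else ""` (cells are str, so str(...) is the identity)
def pvClamp (row : List String) (i : Nat) : String :=
  if i < row.length then row.getD i "" else ""
-- f"{s:<{w}}" in A / s.ljust(w) in B (left-align pad with spaces to width w)
def pvPad (s : String) (w : Nat) : String :=
  String.ofList (s.toList ++ List.replicate (w - s.toList.length) ' ')
-- '-' * w
def pvDash (w : Nat) : String := String.ofList (List.replicate w '-')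

def convert_to_markdown_table_py (values : List (List String)) : String :=
  if values = [] then "No data available"
  else
    let row0 := values.headD []
    -- for col in range(len(values[0])): max(len(str(row[col] if col < len(row) else "")) for row in values)
    let max_widths : List Nat := (List.range row0.length).map (fun col =>
      ((PySem.List.max? (values.map (fun row => (pvClamp row col).toList.length)) id)).getD 0)
    -- header row: enumerate(values[0]) ported as (range n).zip values[0]
    let headerLine := String.join (((List.range row0.length).zip row0).map
      (fun p => "| " ++ pvPad p.2 (max_widths.getD p.1 0) ++ " ")) ++ "|"
    -- separator row
    let sepLine := String.join (max_widths.map (fun w => "| " ++ pvDash w ++ " ")) ++ "|"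
    -- data rows: values[1:]
    let dataLines := (values.drop 1).map (fun row =>
      String.join ((List.range max_widths.length).map
        (fun i => "| " ++ pvPad (pvClamp row i) (max_widths.getD i 0) ++ " ")) ++ "|")
    String.intercalate "\n" (headerLine :: sepLine :: dataLines)

-- ===== PORT B =====
def convert_to_markdown_table_py_alt (values : List (List String)) : String :=
  if values = [] then "No data available"
  else
    let n := (values.headD []).length
    -- columns: for i in range(n), the fully padded column with its separator cell inserted
    let columns : List (List String) := (List.range n).map (fun i =>
      let cells := values.map (fun r => pvClamp r i)
      let w := ((PySem.List.max? (cells.map (fun c => c.toList.length)) id)).getD 0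
      let padded := cells.map (fun c => pvPad c w)
      padded.headD "" :: pvDash w :: padded.drop 1)
    -- transpose: line r = "".join(f"| {col[r]} " for col in columns) + "|"
    -- (col[r] is always in range: every column has len(values)+1 cells; getD is exact here)
    let nrows := values.length + 1
    let lines := (List.range nrows).map (fun r =>
      String.join (columns.map (fun col => "| " ++ col.getD r "" ++ " ")) ++ "|")
    String.intercalate "\n" lines

-- ===== PRECONDITION & SPEC =====
def Spec_convert_to_markdown_table_py (values : List (List String)) (out : String) : Prop := out = convert_to_markdown_table_py_alt values
instance (values : List (List String)) (out : String) : Decidable (Spec_convert_to_markdown_table_py values out) := by unfold Spec_convert_to_markdown_table_py; infer_instance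

-- ===== CLAIM (what is proved, stated in full; the proofs are below) =====
def Claim_equal_convert_to_markdown_table_py : Prop := ∀ (values : List (List String)), Dom_convert_to_markdown_table_py values → Spec_convert_to_markdown_table_py values (convert_to_markdown_table_py values)

-- ===== LEMMAS AND PROOFS =====

-- range(k+2) split into the header index, the separator index, and the shifted data indices
theorem pv_range_add_two (k : Nat) :
    List.range (k + 2) = 0 :: 1 :: (List.range k).map (fun j => j + 2) := by
  rw [List.range_succ_eq_map, List.range_succ_eq_map, List.map_cons, List.map_map]
  rfl

-- getD on a range-map, in range
theorem pv_getD_range_map {α : Type} [Inhabited α] (n i : Nat) (f : Nat → α) (d : α) (h : i < n) :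
    (((List.range n).map f).getD i d) = f i := by
  have : i < ((List.range n).map f).length := by simp [h]
  simp [List.getD, List.getElem?_eq_getElem this]

-- getD on a mapped list, in range
theorem pv_getD_map (vs : List (List String)) (f : List String → String) (j : Nat)
    (h : j < vs.length) : (vs.map f).getD j "" = f vs[j] := by
  have : j < (vs.map f).length := by simp [h]
  simp [List.getD, List.getElem?_eq_getElem this]

-- ===== VERDICT (by name: the statement is the Claim_ definition above) =====
theorem convert_to_markdown_table_py_spec : Claim_equal_convert_to_markdown_table_py := by
  intro values _
  show convert_to_markdown_table_py values = convert_to_markdown_table_py_alt values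
  cases values with
  | nil => rfl
  | cons v vs =>
      have hne : (v :: vs : List (List String)) ≠ [] := List.cons_ne_nil v vs
      rw [convert_to_markdown_table_py, convert_to_markdown_table_py_alt,
        if_neg hne, if_neg hne]
      simp only [List.headD_cons, List.length_cons, List.drop_succ_cons, List.drop_zero,
        List.map_cons, List.map_map, Function.comp_def, List.length_map, List.length_range]
      rw [pv_range_add_two]
      simp only [List.map_cons, List.map_map, Function.comp_def,
        List.getD_cons_zero, List.getD_cons_succ]
      congr 1
      refine List.cons_eq_cons.mpr ⟨?_, List.cons_eq_cons.mpr ⟨?_, ?_⟩⟩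
      · congr 2
        apply List.ext_getElem
        · simp
        · intro i h1 h2
          simp only [List.length_map, List.length_range] at h2
          rw [List.getElem_map, List.getElem_map, List.getElem_zip, List.getElem_range,
            pv_getD_range_map _ _ _ _ h2]
          simp [pvClamp, h2, List.getD]
      · rfl
      · apply List.ext_getElem
        · simp
        · intro j h1 h2
          simp only [List.length_map, List.length_range] at h2
          simp only [List.getElem_map, List.getElem_range]
          congr 2
          apply List.map_congr_left
          intro i hi
          simp only [List.mem_range] at hi
          rw [pv_getD_range_map _ _ _ _ hi, pv_getD_map _ _ _ h2]
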